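-- pv_equiv track=rewrite | github.com/casp24kom/governed-ai-platform | app/snowflake_rag.py | _max_risk_tier
-- ===== SOURCE A (Python) =====
-- from typing import Any, Dict, List, Tuple
--
-- def _max_risk_tier(chunks: List[Dict[str, Any]]) -> str:
--     """Highest tier wins: CRITICAL > MEDIUM > LOW."""
--     order = {"LOW": 0, "MEDIUM": 1, "CRITICAL": 2}
--     best = "LOW"
--     for c in chunks or []:
--         t = (c.get("DOC_RISK_TIER") or "LOW").upper()
--         if t not in order:
--             t = "LOW"
--         if order[t] > order[best]:
--             best = t
--     return best
-- ===== SOURCE B (Python) =====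
-- from typing import Any, Dict, List, Tuple
--
-- _VALID = {"LOW", "MEDIUM", "CRITICAL"}
--
-- def _max_risk_tier(chunks: List[Dict[str, Any]]) -> str:
--     """Highest tier wins: CRITICAL > MEDIUM > LOW."""
--     tiers = {t if t in _VALID else "LOW"
--              for t in ((c.get("DOC_RISK_TIER") or "LOW").upper() for c in chunks or [])}
--     if "CRITICAL" in tiers:
--         return "CRITICAL"
--     if "MEDIUM" in tiers:
--         return "MEDIUM"
--     return "LOW"
-- ===== Notes on version B (the rewrite author's own statement) =====
-- stated objective: idiomatic
-- what changed: Replaced the running-max accumulator loop over a numeric order dict with a one-pass set comprehension of normalized tiers followed by a priority membership test (CRITICAL, then MEDIUM, else LOW).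
import Mathlib
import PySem

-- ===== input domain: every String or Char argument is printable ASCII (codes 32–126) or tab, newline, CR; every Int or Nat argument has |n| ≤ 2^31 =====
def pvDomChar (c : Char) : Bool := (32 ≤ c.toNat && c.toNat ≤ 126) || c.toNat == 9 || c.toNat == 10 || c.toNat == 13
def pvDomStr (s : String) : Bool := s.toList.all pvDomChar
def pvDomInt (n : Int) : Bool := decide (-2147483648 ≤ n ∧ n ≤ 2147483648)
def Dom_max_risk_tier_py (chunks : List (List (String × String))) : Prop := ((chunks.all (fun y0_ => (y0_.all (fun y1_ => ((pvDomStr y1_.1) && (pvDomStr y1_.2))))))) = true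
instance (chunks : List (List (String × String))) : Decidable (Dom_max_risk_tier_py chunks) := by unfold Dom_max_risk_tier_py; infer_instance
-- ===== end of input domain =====

-- B changes the shape of the pass: a set of normalized tiers + priority membership test instead of A's running-max accumulator (idiomatic; same cost).

-- ===== PORT A =====
-- `x or "LOW"` on a str-or-missing value: None and "" are falsy
def pvOrLow (o : Option String) : String :=
  match o with
  | none => "LOW"
  | some s => if s = "" then "LOW" else s

-- dict lookup on the association list = first match (type convention)
def pvGetTier (c : List (String × String)) : Option String :=
  (c.find? (fun p => p.1 == "DOC_RISK_TIER")).map (·.2)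

def max_risk_tier_py (chunks : List (List (String × String))) : String :=
  let order : PySem.Dict String Int := PySem.Dict.ofList [("LOW", 0), ("MEDIUM", 1), ("CRITICAL", 2)]
  chunks.foldl
    (fun best c =>
      let t0 := PySem.Str.upper (pvOrLow (pvGetTier c))
      let t := if order.contains t0 then t0 else "LOW"
      if order.getD best 0 < order.getD t 0 then t else best)
    "LOW"

-- ===== PORT B =====
-- the normalized tier of one chunk (the comprehension's element)
def pvNormTier (c : List (String × String)) : String :=
  let t := PySem.Str.upper (pvOrLow ((c.find? (fun p => p.1 == "DOC_RISK_TIER")).map (·.2)))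
  if t = "LOW" ∨ t = "MEDIUM" ∨ t = "CRITICAL" then t else "LOW"

def max_risk_tier_py_alt (chunks : List (List (String × String))) : String :=
  let tiers : PySem.Set String := PySem.Set.ofList (chunks.map pvNormTier)
  if PySem.Set.contains tiers "CRITICAL" then "CRITICAL"
  else if PySem.Set.contains tiers "MEDIUM" then "MEDIUM"
  else "LOW"

-- ===== PRECONDITION & SPEC =====
def Spec_max_risk_tier_py (chunks : List (List (String × String))) (out : String) : Prop := out = max_risk_tier_py_alt chunks
instance (chunks : List (List (String × String))) (out : String) : Decidable (Spec_max_risk_tier_py chunks out) := by unfold Spec_max_risk_tier_py; infer_instance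

-- ===== CLAIM (what is proved, stated in full; the proofs are below) =====
def Claim_equal_max_risk_tier_py : Prop := ∀ (chunks : List (List (String × String))), Dom_max_risk_tier_py chunks → Spec_max_risk_tier_py chunks (max_risk_tier_py chunks)

-- ===== LEMMAS AND PROOFS =====

lemma pvContains_false (u : String) (h1 : u ≠ "LOW") (h2 : u ≠ "MEDIUM") (h3 : u ≠ "CRITICAL") :
    (PySem.Dict.ofList [("LOW", (0 : Int)), ("MEDIUM", 1), ("CRITICAL", 2)]).contains u = false := by
  have h : PySem.Dict.ofList [("LOW", (0 : Int)), ("MEDIUM", 1), ("CRITICAL", 2)]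
      = PySem.Dict.mk [("LOW", 0), ("MEDIUM", 1), ("CRITICAL", 2)] := by decide
  rw [h]
  simp [PySem.Dict.contains_mk]
  exact ⟨Ne.symm h1, Ne.symm h2, Ne.symm h3⟩

lemma pvNormTier_cases (c : List (String × String)) :
    pvNormTier c = "LOW" ∨ pvNormTier c = "MEDIUM" ∨ pvNormTier c = "CRITICAL" := by
  simp only [pvNormTier]
  split_ifs with h
  · exact h
  · left; rfl

-- A's loop body equals a step determined by pvNormTier
lemma pvStep_eq (best : String) (c : List (String × String))
    (hb : best = "LOW" ∨ best = "MEDIUM" ∨ best = "CRITICAL") :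
    (let order : PySem.Dict String Int := PySem.Dict.ofList [("LOW", 0), ("MEDIUM", 1), ("CRITICAL", 2)]
     let t0 := PySem.Str.upper (pvOrLow (pvGetTier c))
     let t := if order.contains t0 then t0 else "LOW"
     if order.getD best 0 < order.getD t 0 then t else best)
    = (if pvNormTier c = "CRITICAL" ∨ best = "CRITICAL" then
         (if best = "CRITICAL" then best else "CRITICAL")
       else if pvNormTier c = "MEDIUM" ∨ best = "MEDIUM" then
         (if best = "MEDIUM" then best else "MEDIUM")
       else best) := by
  unfold pvNormTier pvGetTier
  simp only []
  generalize PySem.Str.upper (pvOrLow (Option.map (fun x => x.2) (List.find? (fun p => p.1 == "DOC_RISK_TIER") c))) = u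
  by_cases h1 : u = "LOW"
  · subst h1; rcases hb with hb | hb | hb <;> subst hb <;> decide
  · by_cases h2 : u = "MEDIUM"
    · subst h2; rcases hb with hb | hb | hb <;> subst hb <;> decide
    · by_cases h3 : u = "CRITICAL"
      · subst h3; rcases hb with hb | hb | hb <;> subst hb <;> decide
      · simp only [pvContains_false u h1 h2 h3, Bool.false_eq_true, if_false, h1, h2, h3, or_false]
        rcases hb with hb | hb | hb <;> subst hb <;> decide

-- the whole fold, characterized by membership of normalized tiers
lemma pvFold_char (cs : List (List (String × String))) : ∀ (best : String),
    best = "LOW" ∨ best = "MEDIUM" ∨ best = "CRITICAL" →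
    cs.foldl
      (fun best c =>
        let order : PySem.Dict String Int := PySem.Dict.ofList [("LOW", 0), ("MEDIUM", 1), ("CRITICAL", 2)]
        let t0 := PySem.Str.upper (pvOrLow (pvGetTier c))
        let t := if order.contains t0 then t0 else "LOW"
        if order.getD best 0 < order.getD t 0 then t else best)
      best
    = (if best = "CRITICAL" ∨ "CRITICAL" ∈ cs.map pvNormTier then "CRITICAL"
       else if best = "MEDIUM" ∨ "MEDIUM" ∈ cs.map pvNormTier then "MEDIUM"
       else "LOW") := by
  induction cs with
  | nil =>
    intro best hb
    rcases hb with hb | hb | hb <;> simp [hb]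
  | cons c cs ih =>
    intro best hb
    rw [List.foldl_cons, pvStep_eq best c hb]
    have hn := pvNormTier_cases c
    rcases hn with hn | hn | hn <;> rcases hb with hb | hb | hb <;>
      simp only [hn, hb] <;>
      rw [ih _ (by simp)] <;>
      simp [hn, eq_comm]

theorem max_risk_tier_py_fold (chunks : List (List (String × String))) :
    max_risk_tier_py chunks
    = (if "CRITICAL" ∈ chunks.map pvNormTier then "CRITICAL"
       else if "MEDIUM" ∈ chunks.map pvNormTier then "MEDIUM"
       else "LOW") := by
  unfold max_risk_tier_py
  rw [pvFold_char chunks "LOW" (Or.inl rfl)]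
  simp

-- ===== VERDICT (by name: the statement is the Claim_ definition above) =====
theorem max_risk_tier_py_spec : Claim_equal_max_risk_tier_py := by
  intro chunks _
  unfold Spec_max_risk_tier_py max_risk_tier_py_alt
  rw [max_risk_tier_py_fold]
  simp [PySem.Set.contains]
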